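-- pv_equiv track=rewrite | github.com/huanghuoguoguo/ai-writing-bad-cases-app | src/ai_badcase_app/analyzer.py | _code_fence_indices
-- ===== SOURCE A (Python) =====
-- def _code_fence_indices(paragraphs: list[str]) -> set[int]:
--     indices: set[int] = set()
--     in_code_fence = False
--
--     for index, paragraph in enumerate(paragraphs):
--         fence_count = paragraph.count("```")
--         if in_code_fence or fence_count:
--             indices.add(index)
--         if fence_count % 2 == 1:
--             in_code_fence = not in_code_fence
--
--     return indices
-- ===== SOURCE B (Python) =====
-- def _code_fence_indices(paragraphs: list[str]) -> set[int]:
--     # Precompute fence counts and an exclusive prefix-parity table, then select in one pass.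
--     counts = [p.count("```") for p in paragraphs]
--     before = []
--     run = 0
--     for c in counts:
--         before.append(run)
--         run = (run + c) % 2
--     return {i for i, (c, b) in enumerate(zip(counts, before)) if c or b}
-- ===== Notes on version B (the rewrite author's own statement) =====
-- stated objective: alternative
-- what changed: Replaces A's mutable in-fence toggle threaded through a single decision loop by precomputing the fence counts and an exclusive prefix-parity table, then selecting indices in a separate comprehension pass.
import Mathlib
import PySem

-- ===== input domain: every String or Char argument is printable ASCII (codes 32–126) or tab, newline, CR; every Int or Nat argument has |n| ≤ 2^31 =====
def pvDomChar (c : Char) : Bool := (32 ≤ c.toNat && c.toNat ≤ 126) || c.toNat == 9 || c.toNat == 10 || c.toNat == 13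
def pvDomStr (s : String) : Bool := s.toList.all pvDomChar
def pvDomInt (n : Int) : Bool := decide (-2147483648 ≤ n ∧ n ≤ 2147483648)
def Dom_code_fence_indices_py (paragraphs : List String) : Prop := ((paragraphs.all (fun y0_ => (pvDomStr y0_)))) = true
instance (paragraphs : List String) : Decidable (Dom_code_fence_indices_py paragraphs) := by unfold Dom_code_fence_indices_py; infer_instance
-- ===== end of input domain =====

-- B replaces A's mutable in-fence toggle by a precomputed exclusive prefix-parity table
-- consulted in a single comprehension pass (objective: alternative decomposition, same cost).

-- ===== PORT A =====
def code_fence_indices_py (paragraphs : List String) : List Int :=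
  (PySem.List.enumerate paragraphs 0).foldl
    (fun (st : PySem.Set Int × Bool) ip =>
      let fence_count : Int := (PySem.Str.count ip.2 "```" : Int)
      let indices := if st.2 = true ∨ fence_count ≠ 0 then PySem.Set.add st.1 ip.1 else st.1
      let in_code_fence := if PySem.Int.mod fence_count 2 = 1 then !st.2 else st.2
      (indices, in_code_fence))
    (PySem.Set.empty, false) |>.1

-- ===== PORT B =====
def code_fence_indices_py_alt (paragraphs : List String) : List Int :=
  let counts : List Int := paragraphs.map (fun p => (PySem.Str.count p "```" : Int))
  let st := counts.foldl
    (fun (st : List Int × Int) c => (st.1 ++ [st.2], PySem.Int.mod (st.2 + c) 2))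
    ([], 0)
  PySem.Set.ofList ((PySem.List.enumerate (counts.zip st.1) 0).filterMap
    (fun x => if x.2.1 ≠ 0 ∨ x.2.2 ≠ 0 then some x.1 else none))

-- ===== PRECONDITION & SPEC =====
def Spec_code_fence_indices_py (paragraphs : List String) (out : List Int) : Prop := out = code_fence_indices_py_alt paragraphs
instance (paragraphs : List String) (out : List Int) : Decidable (Spec_code_fence_indices_py paragraphs out) := by unfold Spec_code_fence_indices_py; infer_instance

-- ===== CLAIM (what is proved, stated in full; the proofs are below) =====
def Claim_equal_code_fence_indices_py : Prop := ∀ (paragraphs : List String), Dom_code_fence_indices_py paragraphs → Spec_code_fence_indices_py paragraphs (code_fence_indices_py paragraphs)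

-- ===== LEMMAS AND PROOFS =====

-- common reference function: the selected indices for counts cs, incoming parity r (0 or 1), first index i
def cfSpec : List Int → Int → Int → List Int
  | [], _, _ => []
  | c :: cs, r, i => (if c ≠ 0 ∨ r ≠ 0 then [i] else []) ++ cfSpec cs (PySem.Int.mod (r + c) 2) (i + 1)

-- every element of cfSpec cs r i is ≥ i
theorem cfSpec_ge (cs : List Int) (r i : Int) : ∀ x ∈ cfSpec cs r i, i ≤ x := by
  induction cs generalizing r i with
  | nil => simp [cfSpec]
  | cons c cs ih =>
    intro x hx
    simp only [cfSpec, List.mem_append] at hx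
    rcases hx with hx | hx
    · split at hx <;> simp_all
    · have := ih _ _ x hx; omega

theorem cfSpec_nodup (cs : List Int) (r i : Int) : (cfSpec cs r i).Nodup := by
  induction cs generalizing r i with
  | nil => simp [cfSpec]
  | cons c cs ih =>
    simp only [cfSpec]
    split
    · refine List.Nodup.append (by simp) (ih _ _) ?_
      intro a ha hb
      have := cfSpec_ge cs _ (i + 1) a hb
      simp at ha; omega
    · simpa using ih _ _

-- Set.ofList is the identity on duplicate-free lists
theorem set_ofList_eq_of_nodup {xs : List Int} (h : xs.Nodup) : PySem.Set.ofList xs = xs := by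
  have gen : ∀ (ys acc : List Int), (ys ++ acc.reverse).Nodup →
      acc.reverse.foldl PySem.Set.add ys = ys ++ acc.reverse := by
    intro ys acc
    induction acc.reverse generalizing ys with
    | nil => simp
    | cons a l ih =>
      intro hnd
      have ha : a ∉ ys := by
        intro hmem
        have := List.disjoint_of_nodup_append hnd
        exact this hmem (by simp)
      have : PySem.Set.add ys a = ys ++ [a] := by
        simp [PySem.Set.add, PySem.Set.contains, ha]
      simp only [List.foldl_cons, this]
      have := ih (ys ++ [a]) (by simpa using hnd)
      simpa using this
  have := gen [] xs.reverse (by simpa using h)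
  simpa [PySem.Set.ofList_eq_foldl] using this

-- the parity table built by B's fold
def parList : List Int → Int → List Int
  | [], _ => []
  | c :: cs, r => r :: parList cs (PySem.Int.mod (r + c) 2)

theorem foldl_par (cs : List Int) (acc : List Int) (r : Int) :
    (cs.foldl (fun (st : List Int × Int) c => (st.1 ++ [st.2], PySem.Int.mod (st.2 + c) 2)) (acc, r)).1
      = acc ++ parList cs r := by
  induction cs generalizing acc r with
  | nil => simp [parList]
  | cons c cs ih =>
    simp only [List.foldl_cons, parList]
    rw [ih]
    simp

-- B's selection pass computes cfSpec
theorem filterMap_eq_cfSpec (cs : List Int) (r i : Int) :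
    (PySem.List.enumerate (cs.zip (parList cs r)) i).filterMap
      (fun x => if x.2.1 ≠ 0 ∨ x.2.2 ≠ 0 then some x.1 else none) = cfSpec cs r i := by
  induction cs generalizing r i with
  | nil => simp [parList, cfSpec, PySem.List.enumerate_nil]
  | cons c cs ih =>
    simp only [parList, List.zip_cons_cons, PySem.List.enumerate_cons, List.filterMap_cons,
      cfSpec]
    by_cases h : c ≠ 0 ∨ r ≠ 0 <;> simp [h, ih]

theorem alt_eq_cfSpec (paragraphs : List String) :
    code_fence_indices_py_alt paragraphs
      = cfSpec (paragraphs.map (fun p => (PySem.Str.count p "```" : Int))) 0 0 := by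
  unfold code_fence_indices_py_alt
  simp only [foldl_par, List.nil_append, filterMap_eq_cfSpec]
  exact set_ofList_eq_of_nodup (cfSpec_nodup _ _ _)

-- parity correspondence between A's boolean toggle and B's arithmetic parity
theorem parity_step (b : Bool) (c : Int) :
    (if (if PySem.Int.mod c 2 = 1 then !b else b) then (1 : Int) else 0)
      = PySem.Int.mod ((if b then (1 : Int) else 0) + c) 2 := by
  have h2 : (0 : Int) < 2 := by norm_num
  rw [PySem.Int.mod_eq_emod_of_pos h2, PySem.Int.mod_eq_emod_of_pos h2]
  cases b <;> by_cases h : c % 2 = 1 <;> simp [h] <;> omega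

theorem cond_iff (b : Bool) (c : Int) :
    (b = true ∨ c ≠ 0) ↔ (c ≠ 0 ∨ (if b then (1 : Int) else 0) ≠ 0) := by
  cases b <;> simp

-- A's fold, given state below i, appends exactly cfSpec of the remaining paragraphs
theorem foldA_eq (ps : List String) (s : List Int) (b : Bool) (i : Int)
    (hs : ∀ x ∈ s, x < i) :
    ((PySem.List.enumerate ps i).foldl
      (fun (st : PySem.Set Int × Bool) ip =>
        let fence_count : Int := (PySem.Str.count ip.2 "```" : Int)
        let indices := if st.2 = true ∨ fence_count ≠ 0 then PySem.Set.add st.1 ip.1 else st.1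
        let in_code_fence := if PySem.Int.mod fence_count 2 = 1 then !st.2 else st.2
        (indices, in_code_fence))
      (s, b)).1
      = s ++ cfSpec (ps.map (fun p => (PySem.Str.count p "```" : Int)))
          (if b then 1 else 0) i := by
  induction ps generalizing s b i with
  | nil => simp [PySem.List.enumerate_nil, cfSpec]
  | cons p ps ih =>
    simp only [PySem.List.enumerate_cons, List.foldl_cons, List.map_cons, cfSpec]
    by_cases hcond : b = true ∨ ((PySem.Str.count p "```" : Int)) ≠ 0
    · have hcond' : ((PySem.Str.count p "```" : Int)) ≠ 0 ∨ (if b then (1 : Int) else 0) ≠ 0 :=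
        (cond_iff b _).mp hcond
      have hi : i ∉ s := fun hm => absurd (hs i hm) (lt_irrefl i)
      have hadd : PySem.Set.add s i = s ++ [i] := by
        simp [PySem.Set.add, PySem.Set.contains, hi]
      have hstep : ∀ x ∈ s ++ [i], x < i + 1 := by
        intro x hx
        rcases List.mem_append.mp hx with h | h
        · exact (hs x h).trans (by omega)
        · simp at h; omega
      rw [if_pos hcond, hadd, ih (s ++ [i]) _ (i + 1) hstep, parity_step b, if_pos hcond']
      simp
    · have hcond' : ¬ (((PySem.Str.count p "```" : Int)) ≠ 0 ∨ (if b then (1 : Int) else 0) ≠ 0) :=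
        fun h => hcond ((cond_iff b _).mpr h)
      have hstep : ∀ x ∈ s, x < i + 1 := fun x hx => (hs x hx).trans (by omega)
      rw [if_neg hcond, ih s _ (i + 1) hstep, parity_step b, if_neg hcond']
      simp

-- ===== VERDICT (by name: the statement is the Claim_ definition above) =====
theorem code_fence_indices_py_spec : Claim_equal_code_fence_indices_py := by
  intro paragraphs _
  unfold Spec_code_fence_indices_py
  rw [alt_eq_cfSpec]
  unfold code_fence_indices_py
  have := foldA_eq paragraphs [] false 0 (by simp)
  simpa [PySem.Set.empty] using this
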